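-- pv_equiv track=rewrite | github.com/thejourneyville/codewars | 5kyu/the_hunger_games_zoo_disaster.py | prep_data
-- ===== SOURCE A (Python) =====
-- def prep_data(data):
--     animals = {}
--     line = ""
--     for i in data:
--         if i == "\n":
--             if line:
--                 pred_prey = line.split("eats")
--                 line = ""
--
--                 animals.setdefault(pred_prey[0], [])
--                 animals[pred_prey[0]].append(pred_prey[-1])
--                 continue
--
--         elif i == " ":
--             continue
--         else:
--             line += i
--     return animals
-- ===== SOURCE B (Python) =====
-- def prep_data(data):
--     animals = {}
--     for line in data.split('\n')[:-1]:
--         line = line.replace(' ', '')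
--         if line:
--             parts = line.split('eats')
--             animals.setdefault(parts[0], []).append(parts[-1])
--     return animals
-- ===== Notes on version B (the rewrite author's own statement) =====
-- stated objective: faster
-- what changed: A's per-character accumulator loop with branch-and-flush state is replaced by splitting the input into lines once (dropping the last unterminated segment), removing spaces per line and processing each non-empty line with setdefault().append.
import Mathlib
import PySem

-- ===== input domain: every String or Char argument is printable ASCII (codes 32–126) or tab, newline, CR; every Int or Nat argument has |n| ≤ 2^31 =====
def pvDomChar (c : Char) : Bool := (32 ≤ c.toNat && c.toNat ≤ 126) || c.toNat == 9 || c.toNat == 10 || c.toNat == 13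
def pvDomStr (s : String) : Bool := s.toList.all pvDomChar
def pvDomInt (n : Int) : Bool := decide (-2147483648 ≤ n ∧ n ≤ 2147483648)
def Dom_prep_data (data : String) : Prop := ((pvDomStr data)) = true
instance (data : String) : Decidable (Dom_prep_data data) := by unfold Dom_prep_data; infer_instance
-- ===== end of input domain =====

-- B replaces A's per-character accumulator loop by a split-into-lines traversal (C-level str.split instead of a per-char Python loop; measured faster in a timing run); proved equal on all inputs.

-- ===== PORT A =====
-- one step of A's `for i in data` loop; state = (animals, line)
def prepDataStepA (st : PySem.Dict String (List String) × List Char) (i : Char) :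
    PySem.Dict String (List String) × List Char :=
  if i = '\n' then
    if st.2 ≠ [] then
      let pred_prey := PySem.Chars.splitOn st.2 "eats".toList
      let key : String := String.ofList (PySem.List.pyGetD pred_prey 0 [])
      let animals := st.1.setdefault key []
      let animals := animals.insert key
        (animals.getD key [] ++ [String.ofList (PySem.List.pyGetD pred_prey (-1) [])])
      (animals, [])
    else st
  else if i = ' ' then st
  else (st.1, st.2 ++ [i])

def prep_data (data : String) : List (String × List String) :=
  ((data.toList.foldl prepDataStepA (PySem.Dict.empty, [])).1).items

-- ===== PORT B =====
-- body of B's `for line in data.split('\n')[:-1]` loop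
def prepDataAltLine (animals : PySem.Dict String (List String)) (line : List Char) :
    PySem.Dict String (List String) :=
  let line := PySem.Chars.replace line [' '] []
  if line ≠ [] then
    let parts := PySem.Chars.splitOn line "eats".toList
    animals.modify (String.ofList (PySem.List.pyGetD parts 0 [])) []
      (· ++ [String.ofList (PySem.List.pyGetD parts (-1) [])])
  else animals

def prep_data_alt (data : String) : List (String × List String) :=
  let lines := PySem.List.slice (PySem.Chars.splitOn data.toList ['\n']) none (some (-1))
  (lines.foldl prepDataAltLine PySem.Dict.empty).items

-- ===== PRECONDITION & SPEC =====
def Spec_prep_data (data : String) (out : List (String × List String)) : Prop := out = prep_data_alt data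
instance (data : String) (out : List (String × List String)) : Decidable (Spec_prep_data data out) := by unfold Spec_prep_data; infer_instance

-- ===== CLAIM (what is proved, stated in full; the proofs are below) =====
def Claim_equal_prep_data : Prop := ∀ (data : String), Dom_prep_data data → Spec_prep_data data (prep_data data)

-- ===== LEMMAS AND PROOFS =====

-- reference splitter on '\n' (Python str.split('\n'))
def splitNL : List Char → List (List Char)
  | [] => [[]]
  | c :: rest =>
    if c = '\n' then [] :: splitNL rest
    else
      match splitNL rest with
      | [] => [[c]]
      | l :: ls => (c :: l) :: ls

theorem splitNL_ne_nil (cs : List Char) : splitNL cs ≠ [] := by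
  cases cs with
  | nil => simp [splitNL]
  | cons c rest =>
    simp only [splitNL]
    split
    · simp
    · cases h : splitNL rest <;> simp

theorem splitOn_go_spec (fuel : Nat) (l cur : List Char) (acc : List (List Char)) (h : l.length < fuel) :
    PySem.Chars.splitOn.go ['\n'] fuel l cur acc
      = acc.reverse ++ (splitNL l).modifyHead (cur.reverse ++ ·) := by
  induction fuel generalizing l cur acc with
  | zero => omega
  | succ f ih =>
    cases l with
    | nil =>
      rw [PySem.Chars.splitOn.go.eq_def]
      simp [splitNL]
    | cons c rest =>
      rw [PySem.Chars.splitOn.go.eq_def]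
      by_cases hc : c = '\n'
      · subst hc
        have hpre : List.isPrefixOf ['\n'] ('\n' :: rest) = true := by
          simp [List.isPrefixOf]
        simp only [hpre, if_pos] at *
        rw [show List.drop (['\n'] : List Char).length ('\n' :: rest) = rest from rfl]
        rw [ih rest [] (cur.reverse :: acc) (by simp at h; omega)]
        simp [splitNL, show (fun x : List Char => x) = id from rfl]
      · have hpre : List.isPrefixOf ['\n'] (c :: rest) = false := by
          simp [List.isPrefixOf]
          exact fun hh => absurd hh.symm hc
        simp only [hpre, Bool.false_eq_true, if_neg, not_false_iff]
        rw [ih rest (c :: cur) acc (by simp at h; omega)]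
        obtain ⟨l0, ls, hs⟩ : ∃ l0 ls, splitNL rest = l0 :: ls := by
          cases hsn : splitNL rest with
          | nil => exact absurd hsn (splitNL_ne_nil rest)
          | cons a b => exact ⟨a, b, rfl⟩
        simp [splitNL, hc, hs]

theorem splitOn_nl (cs : List Char) : PySem.Chars.splitOn cs ['\n'] = splitNL cs := by
  rw [PySem.Chars.splitOn, splitOn_go_spec cs.length.succ cs [] [] (by omega)]
  simp [show (fun x : List Char => x) = id from rfl]

theorem replace_go_spec (fuel : Nat) (l acc : List Char) (h : l.length ≤ fuel) :
    PySem.Chars.replace.go [' '] [] fuel l acc = acc.reverse ++ l.filter (· ≠ ' ') := by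
  induction fuel generalizing l acc with
  | zero =>
    have hl : l = [] := by
      cases l with
      | nil => rfl
      | cons a b => simp at h
    subst hl
    rw [PySem.Chars.replace.go.eq_def]
    simp
  | succ f ih =>
    cases l with
    | nil =>
      rw [PySem.Chars.replace.go.eq_def]
      simp
    | cons c rest =>
      rw [PySem.Chars.replace.go.eq_def]
      by_cases hc : c = ' '
      · subst hc
        have hpre : List.isPrefixOf [' '] (' ' :: rest) = true := by
          simp [List.isPrefixOf]
        simp only [hpre, if_pos, List.reverse_nil, List.nil_append]
        rw [show List.drop ([' '] : List Char).length (' ' :: rest) = rest from rfl]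
        rw [ih rest acc (by simp at h; omega)]
        simp
      · have hpre : List.isPrefixOf [' '] (c :: rest) = false := by
          simp [List.isPrefixOf]
          exact fun hh => absurd hh.symm hc
        simp only [hpre, Bool.false_eq_true, if_neg, not_false_iff]
        rw [ih rest (c :: acc) (by simp at h; omega)]
        simp [hc]

theorem replace_space (cs : List Char) :
    PySem.Chars.replace cs [' '] [] = cs.filter (· ≠ ' ') := by
  rw [PySem.Chars.replace]
  simp only [List.isEmpty_cons, Bool.false_eq_true, if_neg, not_false_iff]
  rw [replace_go_spec cs.length cs [] (le_refl _)]
  simp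

-- B's flush on an already-space-free line
def flushB (d : PySem.Dict String (List String)) (m : List Char) :
    PySem.Dict String (List String) :=
  if m ≠ [] then
    let parts := PySem.Chars.splitOn m "eats".toList
    d.modify (String.ofList (PySem.List.pyGetD parts 0 [])) []
      (· ++ [String.ofList (PySem.List.pyGetD parts (-1) [])])
  else d

theorem prepDataAltLine_eq (d : PySem.Dict String (List String)) (l : List Char) :
    prepDataAltLine d l = flushB d (l.filter (· ≠ ' ')) := by
  simp [prepDataAltLine, flushB, replace_space]

-- A's setdefault-then-append flush equals B's modify flush
theorem setdefault_append_eq_modify (d : PySem.Dict String (List String)) (k : String) (v : String) :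
    (d.setdefault k []).insert k ((d.setdefault k []).getD k [] ++ [v])
      = d.modify k [] (· ++ [v]) := by
  rw [PySem.Dict.modify]
  by_cases hc : d.contains k = true
  · rw [PySem.Dict.setdefault_of_contains d [] hc]
  · have hcf : d.contains k = false := by simpa using hc
    rw [PySem.Dict.setdefault_of_not_contains d [] hcf]
    have hnomatch : ∀ p ∈ d.items, (p.1 == k) = false := by
      intro p hp
      simp only [PySem.Dict.contains] at hcf
      rw [List.any_eq_false] at hcf
      simpa using hcf p hp
    have hfind : d.items.find? (fun p => p.1 == k) = none := by
      rw [List.find?_eq_none]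
      intro p hp
      simp [hnomatch p hp]
    have hins0 : d.insert k ([] : List String) = PySem.Dict.mk (d.items ++ [(k, [])]) := by
      rw [PySem.Dict.insert, if_neg hc]
    have hgd : d.getD k [] = [] := by
      simp [PySem.Dict.getD, PySem.Dict.get?, hfind]
    have hgd2 : (PySem.Dict.mk (d.items ++ [(k, ([] : List String))])).getD k [] = [] := by
      simp [PySem.Dict.getD, PySem.Dict.get?, List.find?_append, hfind]
    rw [hins0, hgd, hgd2]
    have hc2 : (PySem.Dict.mk (d.items ++ [(k, ([] : List String))])).contains k = true := by
      simp [PySem.Dict.contains]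
    rw [PySem.Dict.insert, if_pos hc2, PySem.Dict.insert, if_neg hc]
    congr 1
    show List.map _ (d.items ++ [(k, [])]) = d.items ++ [(k, [] ++ [v])]
    rw [List.map_append]
    congr 1
    · conv_rhs => rw [← List.map_id d.items]
      apply List.map_congr_left
      intro p hp
      simp [hnomatch p hp]
    · simp

-- the line-structured evaluation of A's loop
def gAcc : PySem.Dict String (List String) → List Char → List (List Char) →
    PySem.Dict String (List String)
  | d, _, [] => d
  | d, _, [_] => d
  | d, acc, a :: b :: rest => gAcc (flushB d (acc ++ a.filter (· ≠ ' '))) [] (b :: rest)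

theorem foldA_eq_gAcc (cs : List Char) (d : PySem.Dict String (List String)) (acc : List Char) :
    (cs.foldl prepDataStepA (d, acc)).1 = gAcc d acc (splitNL cs) := by
  induction cs generalizing d acc with
  | nil => simp [splitNL, gAcc]
  | cons c rest ih =>
    obtain ⟨l0, ls, hs⟩ : ∃ l0 ls, splitNL rest = l0 :: ls := by
      cases hsn : splitNL rest with
      | nil => exact absurd hsn (splitNL_ne_nil rest)
      | cons a b => exact ⟨a, b, rfl⟩
    rw [List.foldl_cons]
    by_cases hc : c = '\n'
    · subst hc
      have hsplit : splitNL ('\n' :: rest) = [] :: l0 :: ls := by simp [splitNL, hs]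
      rw [hsplit]
      by_cases hl : acc = []
      · subst hl
        have hstep : prepDataStepA (d, ([] : List Char)) '\n' = (d, []) := by
          simp [prepDataStepA]
        rw [hstep, ih d [], hs]
        show gAcc d [] (l0 :: ls) = gAcc (flushB d ([] ++ List.filter (· ≠ ' ') [])) [] (l0 :: ls)
        simp [flushB]
      · have hstep : prepDataStepA (d, acc) '\n' = (flushB d acc, []) := by
          simp [prepDataStepA, flushB, hl, setdefault_append_eq_modify]
        rw [hstep, ih _ [], hs]
        show gAcc (flushB d acc) [] (l0 :: ls) = gAcc (flushB d (acc ++ List.filter (· ≠ ' ') [])) [] (l0 :: ls)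
        simp
    · have hsplit : splitNL (c :: rest) = (c :: l0) :: ls := by
        simp only [splitNL, if_neg hc, hs]
      rw [hsplit]
      by_cases hsp : c = ' '
      · subst hsp
        have hstep : prepDataStepA (d, acc) ' ' = (d, acc) := by
          simp [prepDataStepA]
        rw [hstep, ih d acc, hs]
        cases ls with
        | nil => rfl
        | cons b ls' =>
          show gAcc (flushB d (acc ++ List.filter (· ≠ ' ') l0)) [] (b :: ls')
              = gAcc (flushB d (acc ++ List.filter (· ≠ ' ') (' ' :: l0))) [] (b :: ls')
          simp
      · have hstep : prepDataStepA (d, acc) c = (d, acc ++ [c]) := by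
          simp [prepDataStepA, hc, hsp]
        rw [hstep, ih d (acc ++ [c]), hs]
        cases ls with
        | nil => rfl
        | cons b ls' =>
          show gAcc (flushB d ((acc ++ [c]) ++ List.filter (· ≠ ' ') l0)) [] (b :: ls')
              = gAcc (flushB d (acc ++ List.filter (· ≠ ' ') (c :: l0))) [] (b :: ls')
          simp [hsp]

theorem gAcc_eq_foldB (lines : List (List Char)) (d : PySem.Dict String (List String)) :
    gAcc d [] lines = lines.dropLast.foldl prepDataAltLine d := by
  induction lines generalizing d with
  | nil => simp [gAcc]
  | cons a rest ih =>
    cases rest with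
    | nil => simp [gAcc]
    | cons b rest' =>
      show gAcc (flushB d ([] ++ List.filter (· ≠ ' ') a)) [] (b :: rest')
          = ((a :: b :: rest').dropLast).foldl prepDataAltLine d
      rw [List.dropLast_cons_of_ne_nil (by simp), List.foldl_cons, ← ih, prepDataAltLine_eq]
      simp

theorem slice_neg_one_eq_dropLast (xs : List (List Char)) :
    PySem.List.slice xs none (some (-1)) = xs.dropLast :=
  PySem.List.slice_to_neg_one xs

-- ===== VERDICT (by name: the statement is the Claim_ definition above) =====
theorem prep_data_spec : Claim_equal_prep_data := by
  intro data _
  unfold Spec_prep_data prep_data prep_data_alt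
  rw [splitOn_nl, slice_neg_one_eq_dropLast]
  show ((data.toList.foldl prepDataStepA (PySem.Dict.empty, [])).1).items
      = (((splitNL data.toList).dropLast).foldl prepDataAltLine PySem.Dict.empty).items
  rw [foldA_eq_gAcc data.toList PySem.Dict.empty [], gAcc_eq_foldB]
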